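-- pv_equiv track=rewrite | github.com/williamkarmstrong/earnings-iq | app/utils.py | get_previous_quarters
-- ===== SOURCE A (Python) =====
-- def get_previous_quarters(period, year, n=2):
--     """Return list of (period, year) for the n quarters before the given one."""
--     quarters = ["Q1", "Q2", "Q3", "Q4"]
--     idx = quarters.index(period)
--     result = []
--     cur_idx, cur_year = idx, year
--     for _ in range(n):
--         cur_idx -= 1
--         if cur_idx < 0:
--             cur_idx = 3
--             cur_year -= 1
--         result.append((quarters[cur_idx], cur_year))
--     return result
-- ===== SOURCE B (Python) =====
-- def get_previous_quarters(period, year, n=2):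
--     """Return list of (period, year) for the n quarters before the given one."""
--     quarters = ["Q1", "Q2", "Q3", "Q4"]
--     base = year * 4 + quarters.index(period)
--     return [(quarters[(base - i) % 4], (base - i) // 4) for i in range(1, n + 1)]
-- ===== Notes on version B (the rewrite author's own statement) =====
-- stated objective: simpler
-- what changed: Replaces the carried cur_idx/cur_year state and wraparound branch with an absolute quarter number base = year*4 + index(period), computing each output directly as (quarters[(base-i)%4], (base-i)//4) via floor division/modulo.
import Mathlib
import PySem

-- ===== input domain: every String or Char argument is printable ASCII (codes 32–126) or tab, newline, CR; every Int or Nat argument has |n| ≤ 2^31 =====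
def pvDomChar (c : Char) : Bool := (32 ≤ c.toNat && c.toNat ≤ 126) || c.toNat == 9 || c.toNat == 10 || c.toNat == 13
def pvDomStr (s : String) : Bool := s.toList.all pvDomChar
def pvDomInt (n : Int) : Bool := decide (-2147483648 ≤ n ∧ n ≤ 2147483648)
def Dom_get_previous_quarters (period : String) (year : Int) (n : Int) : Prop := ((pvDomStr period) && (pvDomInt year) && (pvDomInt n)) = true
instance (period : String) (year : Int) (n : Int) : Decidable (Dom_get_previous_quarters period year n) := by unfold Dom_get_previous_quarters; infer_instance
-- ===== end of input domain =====

-- B replaces A's carried (cur_idx, cur_year) state and wraparound branch by direct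
-- modular arithmetic on an absolute quarter number (simpler; same O(n) cost).

-- ===== PORT A =====
def get_previous_quarters (period : String) (year : Int) (n : Int) : List (String × Int) :=
  let quarters : List String := ["Q1", "Q2", "Q3", "Q4"]
  match PySem.List.index? quarters period with
  | none => []  -- quarters.index raises ValueError; excluded by Pre_
  | some idx =>
    -- quarters[cur_idx] is always in range (cur_idx ∈ 0..3), so pyGetD is exact here
    (PySem.List.pyRange 0 n 1).foldl
      (fun (st : Int × Int × List (String × Int)) _ =>
        let ci0 := st.1 - 1
        let p : Int × Int := if ci0 < 0 then (3, st.2.1 - 1) else (ci0, st.2.1)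
        (p.1, p.2, st.2.2 ++ [(PySem.List.pyGetD quarters p.1 "", p.2)]))
      ((idx : Int), year, []) |>.2.2

-- ===== PORT B =====
def get_previous_quarters_alt (period : String) (year : Int) (n : Int) : List (String × Int) :=
  let quarters : List String := ["Q1", "Q2", "Q3", "Q4"]
  match PySem.List.index? quarters period with
  | none => []  -- quarters.index raises ValueError; excluded by Pre_
  | some idx =>
    let base : Int := year * 4 + (idx : Int)
    (PySem.List.pyRange 1 (n + 1) 1).map (fun i =>
      (PySem.List.pyGetD quarters (PySem.Int.mod (base - i) 4) "",
       PySem.Int.floordiv (base - i) 4))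

-- ===== PRECONDITION & SPEC =====
-- Pre_ excludes exactly the inputs on which quarters.index(period) raises ValueError
-- (period not one of "Q1".."Q4"); both A and B raise there.
def Pre_get_previous_quarters (period : String) (_year : Int) (_n : Int) : Prop :=
  period = "Q1" ∨ period = "Q2" ∨ period = "Q3" ∨ period = "Q4"
instance (period : String) (year : Int) (n : Int) : Decidable (Pre_get_previous_quarters period year n) := by unfold Pre_get_previous_quarters; infer_instance
def pvWitness_get_previous_quarters : String × Int × Int := ("Q1", 2024, 3)

def Spec_get_previous_quarters (period : String) (year : Int) (n : Int) (out : List (String × Int)) : Prop := out = get_previous_quarters_alt period year n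
instance (period : String) (year : Int) (n : Int) (out : List (String × Int)) : Decidable (Spec_get_previous_quarters period year n out) := by unfold Spec_get_previous_quarters; infer_instance

-- ===== CLAIM (what is proved, stated in full; the proofs are below) =====
def Claim_equal_get_previous_quarters : Prop := ∀ (period : String) (year : Int) (n : Int), Dom_get_previous_quarters period year n → Pre_get_previous_quarters period year n → Spec_get_previous_quarters period year n (get_previous_quarters period year n)

-- ===== LEMMAS AND PROOFS =====

def pvQuarters : List String := ["Q1", "Q2", "Q3", "Q4"]

def pvElem (t : Int) : String × Int :=
  (PySem.List.pyGetD pvQuarters (PySem.Int.mod t 4) "", PySem.Int.floordiv t 4)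

def pvStep (st : Int × Int × List (String × Int)) (_ : Int) : Int × Int × List (String × Int) :=
  let ci0 := st.1 - 1
  let p : Int × Int := if ci0 < 0 then (3, st.2.1 - 1) else (ci0, st.2.1)
  (p.1, p.2, st.2.2 ++ [(PySem.List.pyGetD pvQuarters p.1 "", p.2)])

lemma pvStep_elem (ci cy : Int) (acc : List (String × Int)) (h0 : 0 ≤ ci) (h4 : ci < 4) :
    pvStep (ci, cy, acc) 0 =
      ((cy * 4 + ci - 1) % 4, (cy * 4 + ci - 1) / 4,
        acc ++ [pvElem (cy * 4 + ci - 1)]) := by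
  have hm : PySem.Int.mod (cy * 4 + ci - 1) 4 = (cy * 4 + ci - 1) % 4 :=
    PySem.Int.mod_eq_emod_of_pos (by omega)
  have hd : PySem.Int.floordiv (cy * 4 + ci - 1) 4 = (cy * 4 + ci - 1) / 4 :=
    PySem.Int.floordiv_eq_ediv_of_pos (by omega)
  simp only [pvStep, pvElem, hm, hd]
  split_ifs with h
  · have h1 : (cy * 4 + ci - 1) % 4 = 3 := by omega
    have h2 : (cy * 4 + ci - 1) / 4 = cy - 1 := by omega
    simp [h1, h2]
  · have h1 : (cy * 4 + ci - 1) % 4 = ci - 1 := by omega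
    have h2 : (cy * 4 + ci - 1) / 4 = cy := by omega
    simp [h1, h2]

lemma pvLoop (l : List Int) : ∀ (ci cy : Int) (acc : List (String × Int)),
    0 ≤ ci → ci < 4 →
    (l.foldl pvStep (ci, cy, acc)).2.2 =
      acc ++ (List.range l.length).map (fun j : Nat => pvElem (cy * 4 + ci - ((j : Int) + 1))) := by
  induction l with
  | nil => intro ci cy acc _ _; simp
  | cons x l ih =>
    intro ci cy acc h0 h4
    have hx : pvStep (ci, cy, acc) x = pvStep (ci, cy, acc) 0 := rfl
    rw [List.foldl_cons, hx, pvStep_elem ci cy acc h0 h4]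
    rw [ih _ _ _ (by omega) (by omega)]
    have hA : (cy * 4 + ci - 1) / 4 * 4 + (cy * 4 + ci - 1) % 4 = cy * 4 + ci - 1 := by
      omega
    have harg : ∀ j : Nat, (cy * 4 + ci : Int) - ((j : Int) + 1 + 1) = cy * 4 + ci - 1 - ((j : Int) + 1) := by
      intro j; omega
    simp only [hA, List.length_cons, List.range_succ_eq_map, List.map_cons, List.map_map,
      List.append_assoc, List.singleton_append, Nat.cast_zero, zero_add]
    congr 1
    congr 1
    apply List.map_congr_left
    intro j _
    simp only [Function.comp_apply, Nat.succ_eq_add_one, Nat.cast_add, Nat.cast_one, harg]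

lemma pvMain (idx : Int) (year n : Int) (h0 : 0 ≤ idx) (h4 : idx < 4) :
    ((PySem.List.pyRange 0 n 1).foldl pvStep (idx, year, [])).2.2 =
      (PySem.List.pyRange 1 (n + 1) 1).map (fun i => pvElem (year * 4 + idx - i)) := by
  rw [pvLoop _ idx year [] h0 h4]
  rw [PySem.List.length_pyRange_one, PySem.List.pyRange_one 1 (n + 1), List.map_map]
  rw [show (n - 0).toNat = (n + 1 - 1).toNat from by omega, List.nil_append]
  apply List.map_congr_left
  intro j _
  simp only [Function.comp]
  congr 1
  omega

-- ===== VERDICT (by name: the statement is the Claim_ definition above) =====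
theorem get_previous_quarters_spec : Claim_equal_get_previous_quarters := by
  intro period year n _ hpre
  unfold Spec_get_previous_quarters get_previous_quarters get_previous_quarters_alt
  rcases hpre with h | h | h | h <;> subst h <;>
    simp only [show PySem.List.index? ["Q1","Q2","Q3","Q4"] "Q1" = some 0 from by decide,
               show PySem.List.index? ["Q1","Q2","Q3","Q4"] "Q2" = some 1 from by decide,
               show PySem.List.index? ["Q1","Q2","Q3","Q4"] "Q3" = some 2 from by decide,
               show PySem.List.index? ["Q1","Q2","Q3","Q4"] "Q4" = some 3 from by decide]
  · exact pvMain 0 year n (by omega) (by omega)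
  · exact pvMain 1 year n (by omega) (by omega)
  · exact pvMain 2 year n (by omega) (by omega)
  · exact pvMain 3 year n (by omega) (by omega)
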